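-- pv_equiv track=rewrite | github.com/jcamaproper/casademipadrebackend | casa_de_mi_padre/app/read_file.py | extract_questions_to_map
-- ===== SOURCE A (Python) =====
-- def extract_questions_to_map(text):
--     lines = text.strip().split('\n')
--     questions_map = {}
--     current_chapter = None
--
--     # Process each line
--     for line in lines:
--         # Detect chapter lines by the absence of question marks and presence of numbers
--         if '?' not in line and any(char.isdigit() for char in line):
--             current_chapter = line.strip()
--             questions_map[current_chapter] = []
--         elif '?' in line:
--             # Append the question to the list within the map under the current chapter
--             if current_chapter:
--                 questions_map[current_chapter].append(line.strip())
--
--     return questions_map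
-- ===== SOURCE B (Python) =====
-- def extract_questions_to_map(text):
--     lines = text.strip().split('\n')
--
--     def is_chapter(ln):
--         return '?' not in ln and any(ch.isdigit() for ch in ln)
--
--     # drop everything before the first chapter heading
--     while lines and not is_chapter(lines[0]):
--         lines = lines[1:]
--
--     result = {}
--     while lines:
--         header, body = lines[0], lines[1:]
--         segment = []
--         while body and not is_chapter(body[0]):
--             segment.append(body[0])
--             body = body[1:]
--         result[header.strip()] = [ln.strip() for ln in segment if '?' in ln]
--         lines = body
--     return result
-- ===== Notes on version B (the rewrite author's own statement) =====
-- stated objective: alternative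
-- what changed: B replaces A's single interleaved pass with a mutable current-chapter cursor and per-question dict appends by a chunking decomposition: skip lines before the first chapter, then repeatedly split off one chapter header plus its whole segment of following lines and insert the segment's stripped question lines at once.
import Mathlib
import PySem

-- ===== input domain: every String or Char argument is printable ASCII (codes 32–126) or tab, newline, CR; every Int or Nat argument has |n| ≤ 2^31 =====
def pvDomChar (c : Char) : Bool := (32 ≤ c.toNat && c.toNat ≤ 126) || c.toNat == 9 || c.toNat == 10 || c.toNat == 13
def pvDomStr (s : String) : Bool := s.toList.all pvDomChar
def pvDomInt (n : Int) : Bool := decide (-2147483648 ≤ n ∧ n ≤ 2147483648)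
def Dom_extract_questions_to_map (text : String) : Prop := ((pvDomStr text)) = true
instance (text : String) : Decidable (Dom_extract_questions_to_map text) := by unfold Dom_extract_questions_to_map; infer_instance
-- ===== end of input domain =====

-- B replaces A's single interleaved pass with a mutable current-chapter cursor by a chunking
-- decomposition (skip to the first chapter, then peel off one chapter + its whole segment at a
-- time); objective: alternative decomposition, same cost.

-- ===== PORT A =====
-- one fold over the lines carrying (dict so far, current chapter cursor); Python's truthiness
-- test `if current_chapter:` is ported as the cursor being `some c` with c ≠ ""
def pvStepA (st : PySem.Dict String (List String) × Option String) (line : String) :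
    PySem.Dict String (List String) × Option String :=
  if !(PySem.Str.isIn "?" line) && (line.toList.any PySem.Chars.isdigit) then
    ((st.1.insert (PySem.Str.strip line) []), some (PySem.Str.strip line))
  else if PySem.Str.isIn "?" line then
    match st.2 with
    | some c => if c ≠ "" then (st.1.modify c [] (· ++ [PySem.Str.strip line]), st.2) else st
    | none => st
  else st

def extract_questions_to_map (text : String) : List (String × List String) :=
  let lines := (PySem.Str.split? (PySem.Str.strip text) "\n").getD []
  (lines.foldl pvStepA (PySem.Dict.empty, none)).1.items

-- ===== PORT B =====
def pvIsChapter (ln : String) : Bool :=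
  !(PySem.Str.isIn "?" ln) && (ln.toList.any PySem.Chars.isdigit)

-- the second while loop of Source B: peel off one chapter header + its segment at a time
def pvGoB (res : PySem.Dict String (List String)) : List String → PySem.Dict String (List String)
  | [] => res
  | header :: body =>
      let segment := body.takeWhile (fun l => !pvIsChapter l)
      let rest := body.dropWhile (fun l => !pvIsChapter l)
      pvGoB (res.insert (PySem.Str.strip header)
              ((segment.filter (fun l => PySem.Str.isIn "?" l)).map PySem.Str.strip)) rest
  termination_by ls => ls.length
  decreasing_by
    simpa using Nat.lt_succ_of_le (List.length_dropWhile_le _ _)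

def extract_questions_to_map_alt (text : String) : List (String × List String) :=
  let lines := (PySem.Str.split? (PySem.Str.strip text) "\n").getD []
  (pvGoB PySem.Dict.empty (lines.dropWhile (fun l => !pvIsChapter l))).items

-- ===== PRECONDITION & SPEC =====
def Spec_extract_questions_to_map (text : String) (out : List (String × List String)) : Prop := out = extract_questions_to_map_alt text
instance (text : String) (out : List (String × List String)) : Decidable (Spec_extract_questions_to_map text out) := by unfold Spec_extract_questions_to_map; infer_instance

-- ===== CLAIM (what is proved, stated in full; the proofs are below) =====
def Claim_equal_extract_questions_to_map : Prop := ∀ (text : String), Dom_extract_questions_to_map text → Spec_extract_questions_to_map text (extract_questions_to_map text)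

-- ===== LEMMAS AND PROOFS =====

theorem isspace_eq_false_of_isdigit (c : Char) (h : PySem.Chars.isdigit c = true) :
    PySem.Chars.isspace c = false := by
  unfold PySem.Chars.isdigit at h
  unfold PySem.Chars.isspace
  simp only [Bool.and_eq_true, decide_eq_true_eq, Char.le_def, UInt32.le_iff_toNat_le] at h
  simp only [Bool.or_eq_false_iff, Bool.and_eq_false_iff, decide_eq_false_iff_not, Char.toNat]
  have e0 : '0'.val.toNat = 48 := rfl
  have e9 : '9'.val.toNat = 57 := rfl
  rw [e0, e9] at h
  omega

-- a line recognised as a chapter strips to a nonempty name (it contains a digit)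
theorem strip_ne_empty_of_chapter (h : String) (hd : h.toList.any PySem.Chars.isdigit = true) :
    PySem.Str.strip h ≠ "" := by
  obtain ⟨c, hc, hcd⟩ := List.any_eq_true.mp hd
  have hns : PySem.Chars.isspace c = false := isspace_eq_false_of_isdigit c hcd
  have hmem : ∀ (l : List Char), c ∈ l → c ∈ List.dropWhile PySem.Chars.isspace l := by
    intro l hl
    rcases (List.mem_append.mp (by rw [List.takeWhile_append_dropWhile]; exact hl :
        c ∈ l.takeWhile PySem.Chars.isspace ++ l.dropWhile PySem.Chars.isspace)) with h1 | h2
    · exact absurd (List.mem_takeWhile_imp h1) (by simp [hns])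
    · exact h2
  intro he
  have : (PySem.Str.strip h).toList = [] := by rw [he]; rfl
  rw [PySem.Str.toList_strip] at this
  unfold PySem.Chars.strip PySem.Chars.lstrip PySem.Chars.rstrip at this
  have : c ∈ ([] : List Char) := by
    rw [← this]
    simpa using hmem _ (by simpa using hmem _ hc)
  simp at this

-- overwriting the value at an existing key collapses the previous insert
theorem insert_insert_self (d : PySem.Dict String (List String)) (k : String) (v w : List String) :
    (d.insert k v).insert k w = d.insert k w := by
  apply PySem.Dict.ext
  by_cases hc : d.contains k = true
  · rw [PySem.Dict.items_insert_of_contains _ _ (by simp),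
        PySem.Dict.items_insert_of_contains _ _ hc,
        PySem.Dict.items_insert_of_contains _ _ hc, List.map_map]
    apply List.map_congr_left
    intro p _
    by_cases h : p.1 = k <;> simp [h, Function.comp]
  · rw [PySem.Dict.items_insert_of_contains _ _ (by simp),
        PySem.Dict.items_insert_of_not_contains _ _ (by simpa using hc),
        PySem.Dict.items_insert_of_not_contains _ _ (by simpa using hc)]
    simp only [List.map_append]
    congr 1
    · have h1 : ∀ p ∈ d.items,
          (if (p.1 == k) = true then (k, w) else p) = (id p : String × List String) := by
        intro p hp
        have hk : d.contains p.1 = true := by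
          rw [PySem.Dict.contains_iff_mem_keys]
          exact PySem.Dict.mem_keys_of_mem_items _ hp
        have : p.1 ≠ k := fun e => hc (e ▸ hk)
        simp [this]
      rw [List.map_congr_left h1, List.map_id]
    · simp

theorem modify_insert_self (d : PySem.Dict String (List String)) (k : String)
    (v : List String) (f : List String → List String) :
    (d.insert k v).modify k [] f = d.insert k (f v) := by
  unfold PySem.Dict.modify
  rw [PySem.Dict.getD_insert_self, insert_insert_self]

-- while the cursor is `some c`, A fills exactly the segment up to the next chapter into key c
theorem run_lemma (lines : List String) : ∀ (d : PySem.Dict String (List String)) (c : String)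
    (acc : List String), c ≠ "" →
    (lines.foldl pvStepA (d.insert c acc, some c)).1 =
      pvGoB (d.insert c (acc ++ ((lines.takeWhile (fun l => !pvIsChapter l)).filter
              (fun l => PySem.Str.isIn "?" l)).map PySem.Str.strip))
        (lines.dropWhile (fun l => !pvIsChapter l)) := by
  induction lines with
  | nil => intro d c acc _; simp [pvGoB]
  | cons h rest ih =>
      intro d c acc hc
      by_cases hch : pvIsChapter h = true
      · have hne : PySem.Str.strip h ≠ "" :=
          strip_ne_empty_of_chapter h (Bool.and_eq_true_iff.mp (pvIsChapter.eq_def h ▸ hch)).2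
        have hstep : pvStepA (d.insert c acc, some c) h =
            ((d.insert c acc).insert (PySem.Str.strip h) [], some (PySem.Str.strip h)) := by
          unfold pvStepA
          rw [if_pos (pvIsChapter.eq_def h ▸ hch)]
        have hf : (!pvIsChapter h) = false := by simp [hch]
        rw [List.foldl_cons, hstep, ih _ _ _ hne]
        simp only [List.takeWhile_cons, List.dropWhile_cons, hf, Bool.false_eq_true, if_false]
        simp [pvGoB]
      · have hpred : (!pvIsChapter h) = true := by simp [hch]
        rw [List.foldl_cons]
        simp only [List.takeWhile_cons, List.dropWhile_cons, hpred, if_true]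
        by_cases hq : PySem.Str.isIn "?" h = true
        · have hstep : pvStepA (d.insert c acc, some c) h =
              (d.insert c (acc ++ [PySem.Str.strip h]), some c) := by
            unfold pvStepA
            rw [if_neg (by unfold pvIsChapter at hch; simpa using hch), if_pos hq]
            simp [hc, modify_insert_self]
          rw [hstep, ih _ _ _ hc]
          have hq' : PySem.Chars.isIn ['?'] h.toList = true := by simpa using hq
          simp [hq']
        · have hstep : pvStepA (d.insert c acc, some c) h = (d.insert c acc, some c) := by
            unfold pvStepA
            rw [if_neg (by unfold pvIsChapter at hch; simpa using hch),
                if_neg (by simpa using hq)]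
          rw [hstep, ih _ _ _ hc]
          have hq' : PySem.Chars.isIn ['?'] h.toList = false := by simpa using hq
          simp [hq']

-- with no chapter seen yet, A skips to the first chapter line
theorem skip_lemma (lines : List String) : ∀ (d : PySem.Dict String (List String)),
    lines.foldl pvStepA (d, none) =
      match lines.dropWhile (fun l => !pvIsChapter l) with
      | [] => (d, none)
      | h :: rest =>
          rest.foldl pvStepA (d.insert (PySem.Str.strip h) [], some (PySem.Str.strip h)) := by
  induction lines with
  | nil => intro d; rfl
  | cons h rest ih =>
      intro d
      by_cases hch : pvIsChapter h = true
      · have hstep : pvStepA (d, none) h =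
            (d.insert (PySem.Str.strip h) [], some (PySem.Str.strip h)) := by
          unfold pvStepA
          rw [if_pos (pvIsChapter.eq_def h ▸ hch)]
        have hf : (!pvIsChapter h) = false := by simp [hch]
        rw [List.foldl_cons, hstep]
        simp only [List.dropWhile_cons, hf, Bool.false_eq_true, if_false]
      · have hpred2 : (!pvIsChapter h) = true := by simp [hch]
        have hstep : pvStepA (d, none) h = (d, none) := by
          unfold pvStepA
          rw [if_neg (by unfold pvIsChapter at hch; simpa using hch)]
          split <;> rfl
        rw [List.foldl_cons, hstep]
        simp only [List.dropWhile_cons, hpred2, if_true]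
        exact ih d

-- ===== VERDICT (by name: the statement is the Claim_ definition above) =====
theorem extract_questions_to_map_spec : Claim_equal_extract_questions_to_map := by
  intro text _
  unfold Spec_extract_questions_to_map extract_questions_to_map extract_questions_to_map_alt
  simp only
  rw [skip_lemma]
  cases hdw : (((PySem.Str.split? (PySem.Str.strip text) "\n").getD []).dropWhile
      (fun l => !pvIsChapter l)) with
  | nil => simp [pvGoB]
  | cons h rest =>
      have hch : pvIsChapter h = true := by
        have hne : (((PySem.Str.split? (PySem.Str.strip text) "\n").getD []).dropWhile
            (fun l => !pvIsChapter l)) ≠ [] := by simp [hdw]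
        have := List.head_dropWhile_not (fun l => !pvIsChapter l)
          (l := ((PySem.Str.split? (PySem.Str.strip text) "\n").getD [])) hne
        simpa [hdw] using this
      have hne : PySem.Str.strip h ≠ "" :=
        strip_ne_empty_of_chapter h (Bool.and_eq_true_iff.mp (pvIsChapter.eq_def h ▸ hch)).2
      rw [run_lemma rest PySem.Dict.empty (PySem.Str.strip h) [] hne]
      simp [pvGoB]
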